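-- pv_equiv track=rewrite | github.com/jiazj-jiazj/Codec_Gen | egs/libritts/bin/combine_ar_nar_vc_dir_onlyar.py | del_lcs_update_token
-- ===== SOURCE A (Python) =====
-- def del_lcs_update_token(a, lcs_ab, lcs_token_counts_a, lcs_token_count_b, update_nums):
--
--     lcs_index = 0
--     lcs_token_counts = [0 for xx in range(len(lcs_ab))]
--     updated_tokens = []
--     ll = len(a)
--     i=0
--     while True:
--         if i==ll:
--             break
--         if lcs_index < len(lcs_ab) and a[i] == lcs_ab[lcs_index]:
--             if lcs_token_counts_a[lcs_index] > lcs_token_count_b[lcs_index]: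
--                 can_update_nums = lcs_token_counts_a[lcs_index]- lcs_token_count_b[lcs_index]
--                 if can_update_nums <= update_nums:
--                     nums = lcs_token_count_b[lcs_index]
--                     update_nums-=can_update_nums
--                 else:
--                     nums = lcs_token_counts_a[lcs_index]
--             else:
--                 nums = lcs_token_counts_a[lcs_index]
--
--             updated_tokens+=[lcs_ab[lcs_index]]*nums
--             i+=1
--             while i<ll and a[i]==lcs_ab[lcs_index] :
--                 i+=1
--             lcs_index += 1
--             i-=1
--         else:
--             updated_tokens+=[a[i]]
--         i+=1
--     return updated_tokens, update_nums
-- ===== SOURCE B (Python) =====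
-- def del_lcs_update_token(a, lcs_ab, lcs_token_counts_a, lcs_token_count_b, update_nums):
--     # run-length decomposition: group `a` into (value, count) runs, then one pass over runs
--     runs = []
--     i = 0
--     n = len(a)
--     while i < n:
--         j = i + 1
--         while j < n and a[j] == a[i]:
--             j += 1
--         runs.append((a[i], j - i))
--         i = j
--     out = []
--     k = 0
--     for v, c in runs:
--         if k < len(lcs_ab) and v == lcs_ab[k]:
--             ca = lcs_token_counts_a[k]
--             cb = lcs_token_count_b[k]
--             if ca > cb and ca - cb <= update_nums:
--                 out += [v] * cb
--                 update_nums -= ca - cb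
--             else:
--                 out += [v] * ca
--             k += 1
--         else:
--             out += [v] * c
--     return out, update_nums
-- ===== Notes on version B (the rewrite author's own statement) =====
-- stated objective: simpler
-- what changed: Replaces A's while-True scan with manual index advance, inner skip-while and the i-=1/i+=1 backtrack by a run-length decomposition: a is first grouped into (value, count) runs, then a single plain for-loop over the runs emits either the budget-adjusted count (on an LCS match) or the run verbatim.
import Mathlib
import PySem

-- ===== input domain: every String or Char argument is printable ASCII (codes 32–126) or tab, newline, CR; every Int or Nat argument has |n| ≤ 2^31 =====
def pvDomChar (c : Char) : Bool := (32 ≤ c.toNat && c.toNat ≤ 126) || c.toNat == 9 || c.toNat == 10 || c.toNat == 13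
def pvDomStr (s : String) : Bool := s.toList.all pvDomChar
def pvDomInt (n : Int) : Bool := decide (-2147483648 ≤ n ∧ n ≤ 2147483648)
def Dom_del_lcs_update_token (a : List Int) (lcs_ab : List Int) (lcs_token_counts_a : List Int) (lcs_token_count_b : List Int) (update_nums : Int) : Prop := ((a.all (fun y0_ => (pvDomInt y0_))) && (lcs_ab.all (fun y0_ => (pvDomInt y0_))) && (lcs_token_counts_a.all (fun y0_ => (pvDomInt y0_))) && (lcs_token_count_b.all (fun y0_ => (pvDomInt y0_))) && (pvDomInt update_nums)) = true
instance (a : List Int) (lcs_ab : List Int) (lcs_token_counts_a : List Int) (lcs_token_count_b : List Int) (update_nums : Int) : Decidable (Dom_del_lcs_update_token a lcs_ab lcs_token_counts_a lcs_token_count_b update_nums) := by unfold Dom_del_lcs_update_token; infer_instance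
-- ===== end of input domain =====

-- B replaces A's index-advance/skip/backtrack scan by a run-length decomposition of `a`
-- followed by one plain pass over the runs (objective: simpler). Return-value equivalence only;
-- neither program mutates its arguments.

-- ===== PORT A =====
-- inner `while i<ll and a[i]==lcs_ab[lcs_index]: i+=1` of A
def pySkipA (a : List Int) (v : Int) (i : Nat) : Nat :=
  if i < a.length ∧ a.getD i 0 = v then pySkipA a v (i + 1) else i
termination_by a.length - i
decreasing_by omega

-- cited by loopA's decreasing_by
theorem pySkipA_ge (a : List Int) (v : Int) (i : Nat) : i ≤ pySkipA a v i := by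
  unfold pySkipA
  split
  · have := pySkipA_ge a v (i + 1); omega
  · exact le_refl i
termination_by a.length - i
decreasing_by omega

-- A's `while True` loop; `i -= 1` immediately followed by `i += 1` is folded into passing
-- `pySkipA … (i+1)` directly. A's unused local `lcs_token_counts` is dead code and omitted.
def loopA (a lcs ca cb : List Int) (k : Nat) (out : List Int) (un : Int) (i : Nat) : List Int × Int :=
  if a.length ≤ i then (out, un)
  else if k < lcs.length ∧ a.getD i 0 = lcs.getD k 0 then
    let cav := ca.getD k 0
    let cbv := cb.getD k 0
    let p : Int × Int :=
      if cav > cbv then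
        if cav - cbv ≤ un then (cbv, un - (cav - cbv)) else (cav, un)
      else (cav, un)
    loopA a lcs ca cb (k + 1) (out ++ List.replicate p.1.toNat (lcs.getD k 0)) p.2
      (pySkipA a (lcs.getD k 0) (i + 1))
  else
    loopA a lcs ca cb k (out ++ [a.getD i 0]) un (i + 1)
termination_by a.length - i
decreasing_by
  · have := pySkipA_ge a (lcs.getD k 0) (i + 1); omega
  · omega

def del_lcs_update_token (a : List Int) (lcs_ab : List Int) (lcs_token_counts_a : List Int) (lcs_token_count_b : List Int) (update_nums : Int) : List Int × Int :=
  loopA a lcs_ab lcs_token_counts_a lcs_token_count_b 0 [] update_nums 0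

-- ===== PORT B =====
-- Source B's first phase: group `a` into (value, run-length) runs (the inner `while a[j]==a[i]` scan
-- is the takeWhile/dropWhile of the run starting at the current position)
def runsOf (l : List Int) : List (Int × Nat) :=
  match l with
  | [] => []
  | x :: xs =>
      (x, 1 + (xs.takeWhile (fun y => y == x)).length) :: runsOf (xs.dropWhile (fun y => y == x))
termination_by l.length
decreasing_by
  have := List.length_dropWhile_le (fun y => y == x) xs
  simp only [List.length_cons]; omega

-- Source B's second phase: one pass over the runs
def loopB (lcs ca cb : List Int) (k : Nat) (out : List Int) (un : Int) (rs : List (Int × Nat)) : List Int × Int :=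
  match rs with
  | [] => (out, un)
  | (v, c) :: rest =>
    if k < lcs.length ∧ v = lcs.getD k 0 then
      let cav := ca.getD k 0
      let cbv := cb.getD k 0
      if cav > cbv ∧ cav - cbv ≤ un then
        loopB lcs ca cb (k + 1) (out ++ List.replicate cbv.toNat v) (un - (cav - cbv)) rest
      else
        loopB lcs ca cb (k + 1) (out ++ List.replicate cav.toNat v) un rest
    else
      loopB lcs ca cb k (out ++ List.replicate c v) un rest

def del_lcs_update_token_alt (a : List Int) (lcs_ab : List Int) (lcs_token_counts_a : List Int) (lcs_token_count_b : List Int) (update_nums : Int) : List Int × Int :=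
  loopB lcs_ab lcs_token_counts_a lcs_token_count_b 0 [] update_nums (runsOf a)

-- ===== PRECONDITION & SPEC =====
-- Python A raises IndexError exactly when its scan matches a run of `a` at an LCS position k that
-- is out of range of lcs_token_counts_a or lcs_token_count_b. A's control path (which positions
-- match) depends only on `a` and `lcs_ab`, never on the count lists, so 'A returns normally' is
-- exactly: the number of matched LCS positions is at most the length of each count list.
def pvMatchedCount (lcs : List Int) (l : List Int) (k : Nat) (skip : Option Int) : Nat :=
  match l with
  | [] => k
  | x :: xs =>
    match skip with
    | some v =>
      if x = v then pvMatchedCount lcs xs k (some v)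
      else if k < lcs.length ∧ x = lcs.getD k 0 then pvMatchedCount lcs xs (k + 1) (some x)
      else pvMatchedCount lcs xs k none
    | none =>
      if k < lcs.length ∧ x = lcs.getD k 0 then pvMatchedCount lcs xs (k + 1) (some x)
      else pvMatchedCount lcs xs k none

def Pre_del_lcs_update_token (a : List Int) (lcs_ab : List Int) (lcs_token_counts_a : List Int) (lcs_token_count_b : List Int) (update_nums : Int) : Prop :=
  pvMatchedCount lcs_ab a 0 none ≤ lcs_token_counts_a.length
    ∧ pvMatchedCount lcs_ab a 0 none ≤ lcs_token_count_b.length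
instance (a : List Int) (lcs_ab : List Int) (lcs_token_counts_a : List Int) (lcs_token_count_b : List Int) (update_nums : Int) : Decidable (Pre_del_lcs_update_token a lcs_ab lcs_token_counts_a lcs_token_count_b update_nums) := by unfold Pre_del_lcs_update_token; infer_instance

def pvWitness_del_lcs_update_token : List Int × List Int × List Int × List Int × Int :=
  ([1, 1, 2], [1], [2], [1], 5)

def Spec_del_lcs_update_token (a : List Int) (lcs_ab : List Int) (lcs_token_counts_a : List Int) (lcs_token_count_b : List Int) (update_nums : Int) (out : List Int × Int) : Prop := out = del_lcs_update_token_alt a lcs_ab lcs_token_counts_a lcs_token_count_b update_nums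
instance (a : List Int) (lcs_ab : List Int) (lcs_token_counts_a : List Int) (lcs_token_count_b : List Int) (update_nums : Int) (out : List Int × Int) : Decidable (Spec_del_lcs_update_token a lcs_ab lcs_token_counts_a lcs_token_count_b update_nums out) := by unfold Spec_del_lcs_update_token; infer_instance

-- ===== CLAIM (what is proved, stated in full; the proofs are below) =====
def Claim_equal_del_lcs_update_token : Prop := ∀ (a : List Int) (lcs_ab : List Int) (lcs_token_counts_a : List Int) (lcs_token_count_b : List Int) (update_nums : Int), Dom_del_lcs_update_token a lcs_ab lcs_token_counts_a lcs_token_count_b update_nums → Pre_del_lcs_update_token a lcs_ab lcs_token_counts_a lcs_token_count_b update_nums → Spec_del_lcs_update_token a lcs_ab lcs_token_counts_a lcs_token_count_b update_nums (del_lcs_update_token a lcs_ab lcs_token_counts_a lcs_token_count_b update_nums)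

-- ===== LEMMAS AND PROOFS =====

-- list-level restatement of loopA, used only by the proofs
def loopA' (lcs ca cb : List Int) (k : Nat) (out : List Int) (un : Int) (l : List Int) : List Int × Int :=
  match l with
  | [] => (out, un)
  | x :: xs =>
    if k < lcs.length ∧ x = lcs.getD k 0 then
      let cav := ca.getD k 0
      let cbv := cb.getD k 0
      let p : Int × Int :=
        if cav > cbv then
          if cav - cbv ≤ un then (cbv, un - (cav - cbv)) else (cav, un)
        else (cav, un)
      loopA' lcs ca cb (k + 1) (out ++ List.replicate p.1.toNat (lcs.getD k 0)) p.2
        (xs.dropWhile (fun y => y == lcs.getD k 0))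
    else
      loopA' lcs ca cb k (out ++ [x]) un xs
termination_by l.length
decreasing_by
  · have := List.length_dropWhile_le (fun y => y == lcs.getD k 0) xs
    simp only [List.length_cons]; omega
  · simp only [List.length_cons]; omega

theorem pySkipA_drop (a : List Int) (v : Int) :
    ∀ n i, a.length - i ≤ n →
      a.drop (pySkipA a v i) = (a.drop i).dropWhile (fun y => y == v) := by
  intro n
  induction n with
  | zero =>
    intro i hi
    have hle : a.length ≤ i := by omega
    rw [pySkipA]
    have : ¬ (i < a.length ∧ a.getD i 0 = v) := by omega
    rw [if_neg this, List.drop_eq_nil_of_le hle, List.dropWhile_nil]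
  | succ m ih =>
    intro i hi
    rw [pySkipA]
    by_cases h : i < a.length ∧ a.getD i 0 = v
    · rw [if_pos h]
      have hlt := h.1
      have hdrop : a.drop i = a[i] :: a.drop (i + 1) := List.drop_eq_getElem_cons hlt
      have hv : a[i] = v := by
        have := h.2; rwa [List.getD_eq_getElem _ _ hlt] at this
      rw [hdrop, List.dropWhile_cons]
      simp only [hv, beq_self_eq_true, if_pos]
      exact ih (i + 1) (by omega)
    · rw [if_neg h]
      by_cases hlt : i < a.length
      · have hne : a.getD i 0 ≠ v := fun hv => h ⟨hlt, hv⟩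
        have hdrop : a.drop i = a[i] :: a.drop (i + 1) := List.drop_eq_getElem_cons hlt
        have hv : (a[i] == v) = false := by
          rw [List.getD_eq_getElem _ _ hlt] at hne
          simpa using hne
        rw [hdrop, List.dropWhile_cons, hv]
        simp
      · rw [List.drop_eq_nil_of_le (by omega), List.dropWhile_nil]

theorem loopA_eq_loopA' (a lcs ca cb : List Int) :
    ∀ n i k out un, a.length - i ≤ n →
      loopA a lcs ca cb k out un i = loopA' lcs ca cb k out un (a.drop i) := by
  intro n
  induction n with
  | zero =>
    intro i k out un hi
    have hle : a.length ≤ i := by omega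
    rw [loopA, if_pos hle, List.drop_eq_nil_of_le hle, loopA']
  | succ m ih =>
    intro i k out un hi
    rw [loopA]
    by_cases hlt : a.length ≤ i
    · rw [if_pos hlt, List.drop_eq_nil_of_le hlt, loopA']
    · rw [if_neg hlt]
      have hlt' : i < a.length := by omega
      have hdrop : a.drop i = a.getD i 0 :: a.drop (i + 1) := by
        rw [List.getD_eq_getElem _ _ hlt']; exact List.drop_eq_getElem_cons hlt'
      rw [hdrop, loopA']
      by_cases h : k < lcs.length ∧ a.getD i 0 = lcs.getD k 0
      · rw [if_pos h, if_pos h]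
        have hskip := pySkipA_ge a (lcs.getD k 0) (i + 1)
        rw [ih (pySkipA a (lcs.getD k 0) (i + 1)) _ _ _ (by omega)]
        rw [pySkipA_drop a (lcs.getD k 0) (a.length - (i + 1)) (i + 1) (le_refl _)]
      · rw [if_neg h, if_neg h]
        exact ih (i + 1) _ _ _ (by omega)

-- loopB consumes a run one element longer by first emitting one copy, when the run does not match
theorem loopB_stutter (lcs ca cb : List Int) (k : Nat) (out : List Int) (un : Int)
    (v : Int) (c : Nat) (rest : List (Int × Nat))
    (h : ¬ (k < lcs.length ∧ v = lcs.getD k 0)) :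
    loopB lcs ca cb k out un ((v, c + 1) :: rest)
      = loopB lcs ca cb k (out ++ [v]) un ((v, c) :: rest) := by
  rw [loopB, loopB, if_neg h, if_neg h]
  congr 1
  rw [List.replicate_succ, List.append_assoc]
  rfl

theorem loopB_single (lcs ca cb : List Int) (k : Nat) (out : List Int) (un : Int)
    (v : Int) (rest : List (Int × Nat))
    (h : ¬ (k < lcs.length ∧ v = lcs.getD k 0)) :
    loopB lcs ca cb k out un ((v, 1) :: rest) = loopB lcs ca cb k (out ++ [v]) un rest := by
  rw [loopB, if_neg h, List.replicate_one]

theorem loopA'_eq_loopB (lcs ca cb : List Int) :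
    ∀ n (l : List Int), l.length ≤ n → ∀ k out un,
      loopA' lcs ca cb k out un l = loopB lcs ca cb k out un (runsOf l) := by
  intro n
  induction n with
  | zero =>
    intro l hl k out un
    have : l = [] := List.eq_nil_of_length_eq_zero (by omega)
    subst this
    rw [loopA', runsOf, loopB]
  | succ m ih =>
    intro l hl k out un
    match l with
    | [] => rw [loopA', runsOf, loopB]
    | x :: xs =>
      rw [loopA']
      by_cases h : k < lcs.length ∧ x = lcs.getD k 0
      · rw [if_pos h]
        rw [show runsOf (x :: xs)
              = (x, 1 + (xs.takeWhile (fun y => y == x)).length)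
                  :: runsOf (xs.dropWhile (fun y => y == x)) from by rw [runsOf]]
        rw [loopB, if_pos h]
        rw [← h.2]
        have hlen : (xs.dropWhile (fun y => y == x)).length ≤ m := by
          have := List.length_dropWhile_le (fun y => y == x) xs
          simp only [List.length_cons] at hl; omega
        have hrec := ih (xs.dropWhile (fun y => y == x)) hlen
        by_cases hgt : ca.getD k 0 > cb.getD k 0
        · by_cases hbud : ca.getD k 0 - cb.getD k 0 ≤ un
          · simp only [if_pos hgt, if_pos hbud, if_pos (And.intro hgt hbud)]
            exact hrec _ _ _
          · have hB : ¬ (ca.getD k 0 > cb.getD k 0 ∧ ca.getD k 0 - cb.getD k 0 ≤ un) :=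
              fun hc => hbud hc.2
            simp only [if_pos hgt, if_neg hbud, if_neg hB]
            exact hrec _ _ _
        · have hB : ¬ (ca.getD k 0 > cb.getD k 0 ∧ ca.getD k 0 - cb.getD k 0 ≤ un) :=
            fun hc => hgt hc.1
          simp only [if_neg hgt, if_neg hB]
          exact hrec _ _ _
      · rw [if_neg h]
        have hxs : xs.length ≤ m := by simp only [List.length_cons] at hl; omega
        rw [ih xs hxs k (out ++ [x]) un]
        match xs with
        | [] =>
          rw [runsOf]
          rw [show runsOf [x] = [(x, 1)] from by
            rw [runsOf]
            simp [runsOf]]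
          rw [loopB_single lcs ca cb k out un x [] h]
        | y :: xs2 =>
          by_cases hyx : y = x
          · subst hyx
            rw [show runsOf (y :: y :: xs2)
                  = (y, (1 + (xs2.takeWhile (fun z => z == y)).length) + 1)
                      :: runsOf (xs2.dropWhile (fun z => z == y)) from by
                rw [runsOf]
                simp only [List.takeWhile_cons, beq_self_eq_true, if_true, List.length_cons,
                  List.dropWhile_cons, Nat.add_comm]]
            rw [show runsOf (y :: xs2)
                  = (y, 1 + (xs2.takeWhile (fun z => z == y)).length)
                      :: runsOf (xs2.dropWhile (fun z => z == y)) from by rw [runsOf]]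
            exact (loopB_stutter lcs ca cb k out un y _ _ h).symm
          · have hby : (y == x) = false := by simpa using hyx
            rw [show runsOf (x :: y :: xs2) = (x, 1) :: runsOf (y :: xs2) from by
              rw [runsOf]
              simp [hby]]
            exact (loopB_single lcs ca cb k out un x (runsOf (y :: xs2)) h).symm

-- ===== VERDICT (by name: the statement is the Claim_ definition above) =====
theorem del_lcs_update_token_spec : Claim_equal_del_lcs_update_token := by
  intro a lcs ca cb un _ _
  unfold Spec_del_lcs_update_token del_lcs_update_token del_lcs_update_token_alt
  rw [loopA_eq_loopA' a lcs ca cb a.length 0 0 [] un (by omega)]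
  simp only [List.drop_zero]
  exact loopA'_eq_loopB lcs ca cb a.length a (le_refl _) 0 [] un
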